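-- pv_equiv track=rewrite | github.com/TomasIb/ProyectoTesis | pysrc/app/methods.py | setHeaders
-- ===== SOURCE A (Python) =====
-- def setHeaders(_headers,_dtype):
--     norm_columns_options= []
--     cat_columns_options=[]
--     no_encoded_cat_columns_options=[]
--     for x in range(len(_headers)):
--         if(_dtype[x] == 'continua'):
--             norm_columns_options.append( _headers[x] )
--         elif(_dtype[x] == 'categorica no codificada'):
--             no_encoded_cat_columns_options.append(_headers[x] )
--             cat_columns_options.append(_headers[x] )
--         elif(_dtype[x] == 'categorica codificada'):
--             cat_columns_options.append(_headers[x] )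
--
--     return norm_columns_options,no_encoded_cat_columns_options,cat_columns_options
-- ===== SOURCE B (Python) =====
-- def setHeaders(_headers, _dtype):
--     n = len(_headers)
--     norm = [_headers[x] for x in range(n) if _dtype[x] == 'continua']
--     no_encoded = [_headers[x] for x in range(n)
--                   if _dtype[x] == 'categorica no codificada']
--     cat = [_headers[x] for x in range(n)
--            if _dtype[x] in ('categorica no codificada', 'categorica codificada')]
--     return norm, no_encoded, cat
-- ===== Notes on version B (the rewrite author's own statement) =====
-- stated objective: idiomatic
-- what changed: B computes each of the three output lists in its own filtered index comprehension over range(len(_headers)), instead of A's single loop threading three accumulators through an if/elif branch chain.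
import Mathlib
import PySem

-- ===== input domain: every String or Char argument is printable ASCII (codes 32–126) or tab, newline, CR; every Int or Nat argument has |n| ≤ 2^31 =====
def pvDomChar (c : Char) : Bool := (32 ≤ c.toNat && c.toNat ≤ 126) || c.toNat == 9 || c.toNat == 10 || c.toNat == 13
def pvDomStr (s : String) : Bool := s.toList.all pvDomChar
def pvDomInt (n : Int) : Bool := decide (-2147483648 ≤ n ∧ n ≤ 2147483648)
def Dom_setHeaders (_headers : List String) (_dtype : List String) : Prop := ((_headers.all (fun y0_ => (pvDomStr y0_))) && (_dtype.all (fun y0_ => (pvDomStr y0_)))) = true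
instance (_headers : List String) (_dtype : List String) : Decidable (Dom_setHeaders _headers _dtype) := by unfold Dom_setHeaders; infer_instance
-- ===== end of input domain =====

-- B builds each of the three lists by its own filtered index comprehension over range(len(_headers)),
-- instead of A's single index loop threading three accumulators through an if/elif chain (objective: idiomatic; same cost).


-- ===== PORT A =====
-- the body of A's for-loop over x in range(len(_headers)), acting on the three accumulators
def pvStepA (acc : List String × List String × List String) (hd : String × String) :
    List String × List String × List String :=
  if hd.2 == "continua" then (acc.1 ++ [hd.1], acc.2.1, acc.2.2)
  else if hd.2 == "categorica no codificada" then (acc.1, acc.2.1 ++ [hd.1], acc.2.2 ++ [hd.1])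
  else if hd.2 == "categorica codificada" then (acc.1, acc.2.1, acc.2.2 ++ [hd.1])
  else acc

def setHeaders (_headers : List String) (_dtype : List String) : List String × List String × List String :=
  (PySem.List.pyRange 0 (_headers.length : Int) 1).foldl
    (fun acc x => pvStepA acc (PySem.List.pyGetD _headers x "", PySem.List.pyGetD _dtype x ""))
    ([], [], [])

-- ===== PORT B =====
-- each comprehension: filter the index range by the dtype test, then map the index to _headers[x]
def setHeaders_alt (_headers : List String) (_dtype : List String) : List String × List String × List String :=
  let idx := PySem.List.pyRange 0 (_headers.length : Int) 1
  (((idx.filter (fun x => PySem.List.pyGetD _dtype x "" == "continua")).map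
      (fun x => PySem.List.pyGetD _headers x "")),
   ((idx.filter (fun x => PySem.List.pyGetD _dtype x "" == "categorica no codificada")).map
      (fun x => PySem.List.pyGetD _headers x "")),
   ((idx.filter (fun x => PySem.List.pyGetD _dtype x "" == "categorica no codificada"
        || PySem.List.pyGetD _dtype x "" == "categorica codificada")).map
      (fun x => PySem.List.pyGetD _headers x "")))

-- ===== PRECONDITION & SPEC =====
-- Pre_ excludes _dtype shorter than _headers, where A (and B) raise IndexError.
def Pre_setHeaders (_headers : List String) (_dtype : List String) : Prop :=
  _headers.length ≤ _dtype.length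
instance (_headers : List String) (_dtype : List String) : Decidable (Pre_setHeaders _headers _dtype) := by unfold Pre_setHeaders; infer_instance
def pvWitness_setHeaders : List String × List String :=
  (["a", "b", "c"], ["continua", "categorica no codificada", "categorica codificada"])

def Spec_setHeaders (_headers : List String) (_dtype : List String) (out : List String × List String × List String) : Prop := out = setHeaders_alt _headers _dtype
instance (_headers : List String) (_dtype : List String) (out : List String × List String × List String) : Decidable (Spec_setHeaders _headers _dtype out) := by unfold Spec_setHeaders; infer_instance

-- ===== CLAIM (what is proved, stated in full; the proofs are below) =====
def Claim_equal_setHeaders : Prop := ∀ (_headers : List String) (_dtype : List String), Dom_setHeaders _headers _dtype → Pre_setHeaders _headers _dtype → Spec_setHeaders _headers _dtype (setHeaders _headers _dtype)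

-- ===== LEMMAS AND PROOFS =====

-- the left fold of A's step over any pair list appends the three filtered projections
theorem pvFoldA_eq (Z : List (String × String)) :
    ∀ (nm ne ct : List String),
      Z.foldl pvStepA (nm, ne, ct) =
        (nm ++ (Z.filter (fun p => p.2 == "continua")).map Prod.fst,
         ne ++ (Z.filter (fun p => p.2 == "categorica no codificada")).map Prod.fst,
         ct ++ (Z.filter (fun p => p.2 == "categorica no codificada" || p.2 == "categorica codificada")).map Prod.fst) := by
  induction Z with
  | nil => simp
  | cons hd tl ih =>
    intro nm ne ct
    by_cases h1 : hd.2 = "continua"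
    · simp [pvStepA, h1, ih]
    · by_cases h2 : hd.2 = "categorica no codificada"
      · simp [pvStepA, h2, ih]
      · by_cases h3 : hd.2 = "categorica codificada"
        · simp [pvStepA, h3, ih]
        · simp [pvStepA, h1, h2, h3, ih]

-- a filtered index comprehension over range(len xs) equals the corresponding filter of xs.zip ys
theorem pvComprehension_eq (xs ys : List String) (h : xs.length ≤ ys.length) (p : String → Bool) :
    ((PySem.List.pyRange 0 (xs.length : Int) 1).filter
        (fun x => p (PySem.List.pyGetD ys x ""))).map
      (fun x => PySem.List.pyGetD xs x "") =
    ((xs.zip ys).filter (fun q => p q.2)).map Prod.fst := by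
  induction xs generalizing ys with
  | nil => simp [PySem.List.pyRange_one_eq_nil]
  | cons a xs ih =>
    cases ys with
    | nil => simp at h
    | cons b ys =>
      have hcons : PySem.List.pyRange 0 ((a :: xs).length : Int) 1 =
          0 :: PySem.List.pyRange 1 ((a :: xs).length : Int) 1 :=
        PySem.List.pyRange_one_cons (by simp)
      have hshift : PySem.List.pyRange 1 ((a :: xs).length : Int) 1 =
          (PySem.List.pyRange 0 (xs.length : Int) 1).map (· + 1) := by
        simp [PySem.List.pyRange_one]
        intro k _
        omega
      have hsucc : ∀ (zs : List String) (c : String) (k : Int), 0 ≤ k →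
          PySem.List.pyGetD (c :: zs) (k + 1) "" = PySem.List.pyGetD zs k "" := by
        intro zs c k hk
        obtain ⟨m, rfl⟩ := Int.eq_ofNat_of_zero_le hk
        have : ((m : Int) + 1) = ((m + 1 : Nat) : Int) := by push_cast; ring
        rw [this, PySem.List.pyGetD_natCast, PySem.List.pyGetD_natCast]
        simp [List.getD]
      rw [hcons]
      have h0d : PySem.List.pyGetD (b :: ys) (0 : Int) "" = b := by
        have : ((0 : Nat) : Int) = (0 : Int) := rfl
        rw [← this, PySem.List.pyGetD_natCast]; simp [List.getD]
      have h0h : PySem.List.pyGetD (a :: xs) (0 : Int) "" = a := by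
        have : ((0 : Nat) : Int) = (0 : Int) := rfl
        rw [← this, PySem.List.pyGetD_natCast]; simp [List.getD]
      have htail :
          ((PySem.List.pyRange 1 ((a :: xs).length : Int) 1).filter
              (fun x => p (PySem.List.pyGetD (b :: ys) x ""))).map
            (fun x => PySem.List.pyGetD (a :: xs) x "") =
          ((xs.zip ys).filter (fun q => p q.2)).map Prod.fst := by
        rw [hshift, List.filter_map, List.map_map]
        have hfil : (PySem.List.pyRange 0 (xs.length : Int) 1).filter
            ((fun x => p (PySem.List.pyGetD (b :: ys) x "")) ∘ fun x => x + 1) =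
            (PySem.List.pyRange 0 (xs.length : Int) 1).filter
            (fun x => p (PySem.List.pyGetD ys x "")) := by
          apply List.filter_congr
          intro x hx
          rw [PySem.List.mem_pyRange_one] at hx
          simp only [Function.comp_apply]
          rw [hsucc ys b x hx.1]
        rw [hfil]
        have hmem : ∀ x ∈ (PySem.List.pyRange 0 (xs.length : Int) 1).filter
            (fun x => p (PySem.List.pyGetD ys x "")),
            ((fun x => PySem.List.pyGetD (a :: xs) x "") ∘ fun x => x + 1) x =
            (fun x => PySem.List.pyGetD xs x "") x := by
          intro x hx
          have hx' := List.mem_of_mem_filter hx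
          rw [PySem.List.mem_pyRange_one] at hx'
          simp only [Function.comp_apply]
          exact hsucc xs a x hx'.1
        rw [List.map_congr_left hmem]
        exact ih ys (by simp at h; omega)
      rw [List.zip_cons_cons, List.filter_cons, List.filter_cons]
      simp only [h0d]
      by_cases hp : p b = true
      · rw [if_pos hp, if_pos hp]
        simp only [List.map_cons, h0h]
        rw [htail]
      · rw [if_neg hp, if_neg hp]
        rw [htail]

-- ===== VERDICT (by name: the statement is the Claim_ definition above) =====
theorem setHeaders_spec : Claim_equal_setHeaders := by
  intro hs ds _ hpre
  have hpre' : hs.length ≤ ds.length := hpre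
  unfold Spec_setHeaders setHeaders setHeaders_alt
  have hz : (hs.zip ds).length = hs.length := by
    simp [List.length_zip]; omega
  have hcongr :
      (PySem.List.pyRange 0 (hs.length : Int) 1).foldl
        (fun acc x => pvStepA acc (PySem.List.pyGetD hs x "", PySem.List.pyGetD ds x ""))
        ([], [], []) =
      (PySem.List.pyRange 0 ((hs.zip ds).length : Int) 1).foldl
        (fun acc x => pvStepA acc (PySem.List.pyGetD (hs.zip ds) x ("", "")))
        ([], [], []) := by
    rw [hz]
    apply PySem.List.foldl_congr_mem
    intro acc x hx
    rw [PySem.List.mem_pyRange_one] at hx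
    have hxlt : x.toNat < hs.length := by omega
    have hxd : x.toNat < ds.length := by omega
    have hxz : x.toNat < (hs.zip ds).length := by omega
    rw [PySem.List.pyGetD_eq_getElem hs "" hx.1 hx.2,
        PySem.List.pyGetD_eq_getElem ds "" hx.1 (by have := hx.2; omega),
        PySem.List.pyGetD_eq_getElem (hs.zip ds) ("", "") hx.1 (by rw [hz]; exact hx.2)]
    simp [List.getElem_zip]
  rw [hcongr, PySem.List.foldl_pyRange_zero_pyGetD' (hs.zip ds) ("", "") pvStepA ([], [], []),
      pvFoldA_eq]
  simp only [List.nil_append]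
  rw [pvComprehension_eq hs ds hpre' (fun s => s == "continua"),
      pvComprehension_eq hs ds hpre' (fun s => s == "categorica no codificada"),
      pvComprehension_eq hs ds hpre' (fun s => s == "categorica no codificada" || s == "categorica codificada")]
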